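-- pv_equiv track=rewrite | github.com/akneewhowah/310Infragroup7nyameow | ansible/roles/whackamole/files/utilities.py | find_incident
-- ===== SOURCE A (Python) =====
-- def find_incident(incidents, criteria, newest=False):
--     def matches(incident):
--         for key, required in criteria.items():
--             value = incident.get(key)
--             if isinstance(required, (tuple, list)):
--                 if value not in required:
--                     return False
--             else:
--                 if value != required:
--                     return False
--         return True
--     candidates = [
--         (iid, data)
--         for iid, data in incidents.items()
--         if matches(data)
--     ]
--     if not candidates:
--         return None
--     key_fn = (lambda x: -x[1]["timestamp"]) if newest else (lambda x: x[1]["timestamp"])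
--     selected_iid, _ = min(candidates, key=key_fn)
--     return selected_iid
-- ===== SOURCE B (Python) =====
-- def find_incident(incidents, criteria, newest=False):
--     def matches(incident):
--         for key, required in criteria.items():
--             value = incident.get(key)
--             if isinstance(required, (tuple, list)):
--                 if value not in required:
--                     return False
--             else:
--                 if value != required:
--                     return False
--         return True
--     ts_list = [data["timestamp"] for data in incidents.values() if matches(data)]
--     if not ts_list:
--         return None
--     target = max(ts_list) if newest else min(ts_list)
--     for iid, data in incidents.items():
--         if matches(data) and data["timestamp"] == target:
--             return iid
-- ===== Notes on version B (the rewrite author's own statement) =====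
-- stated objective: alternative
-- what changed: Replaced the candidates-list + min(key=...) selection by staged passes: first collect the timestamps of matching incidents and take their plain max/min as a target value, then scan incidents again and return the first matching incident whose timestamp equals that target (same first-wins ties as min).
import Mathlib
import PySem

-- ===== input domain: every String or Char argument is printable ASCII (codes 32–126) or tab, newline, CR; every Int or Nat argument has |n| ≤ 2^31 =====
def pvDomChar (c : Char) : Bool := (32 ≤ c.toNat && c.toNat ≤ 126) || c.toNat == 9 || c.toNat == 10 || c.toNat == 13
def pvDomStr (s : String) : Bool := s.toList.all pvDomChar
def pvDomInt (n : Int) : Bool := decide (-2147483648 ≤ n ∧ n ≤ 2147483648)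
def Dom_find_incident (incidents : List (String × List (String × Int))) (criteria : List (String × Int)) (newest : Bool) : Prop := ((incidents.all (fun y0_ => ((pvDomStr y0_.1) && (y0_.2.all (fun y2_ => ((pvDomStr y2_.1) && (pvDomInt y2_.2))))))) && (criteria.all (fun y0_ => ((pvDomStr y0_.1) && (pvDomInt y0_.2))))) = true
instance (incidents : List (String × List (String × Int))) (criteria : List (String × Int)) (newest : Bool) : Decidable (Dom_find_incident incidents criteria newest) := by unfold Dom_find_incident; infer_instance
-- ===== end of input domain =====

-- B replaces A's candidates-list + min(key=...) by staged passes: compute the target (extremal)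
-- timestamp among matching incidents, then return the first matching incident with that timestamp.
-- Pre_ excludes inputs where Python raises KeyError (a matching incident without a "timestamp" key).


-- ===== PORT A =====
-- shared helper: the nested matches() (identical in A and B); criteria values are ints here,
-- so the isinstance-tuple/list branch of the Python is dead and only the '!=' branch is ported.
def fiMatches (criteria : List (String × Int)) (incident : List (String × Int)) : Bool :=
  ((PySem.Dict.ofList criteria).items).all
    (fun kr => (PySem.Dict.ofList incident).get? kr.1 == some kr.2)

-- data["timestamp"] is ported as getD "timestamp" 0; Pre_ guarantees the key is present on
-- every candidate, which is exactly where the Python reads it.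
def find_incident (incidents : List (String × List (String × Int))) (criteria : List (String × Int)) (newest : Bool) : Option String :=
  let candidates := ((PySem.Dict.ofList incidents).items).filter (fun p => fiMatches criteria p.2)
  if candidates = [] then none
  else
    let key_fn : (String × List (String × Int)) → Int :=
      if newest then (fun x => -((PySem.Dict.ofList x.2).getD "timestamp" 0))
      else (fun x => (PySem.Dict.ofList x.2).getD "timestamp" 0)
    (PySem.List.min? candidates key_fn).map (fun s => s.1)

-- ===== PORT B =====
-- B: pass 1 builds the timestamps of matching incidents; target = plain max/min of that list;
-- pass 2 returns the first incident matching the criteria whose timestamp equals target.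
def find_incident_alt (incidents : List (String × List (String × Int))) (criteria : List (String × Int)) (newest : Bool) : Option String :=
  let items := (PySem.Dict.ofList incidents).items
  let tsList := (items.filter (fun p => fiMatches criteria p.2)).map
      (fun p => (PySem.Dict.ofList p.2).getD "timestamp" 0)
  match (if newest then PySem.List.max? tsList (fun t => t) else PySem.List.min? tsList (fun t => t)) with
  | none => none
  | some target =>
      (items.find? (fun p => fiMatches criteria p.2 && ((PySem.Dict.ofList p.2).getD "timestamp" 0 == target))).map (fun s => s.1)

-- ===== PRECONDITION & SPEC =====
-- Pre_ excludes exactly the inputs on which the Python A (and B) raises KeyError: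
-- some incident matching the criteria has no "timestamp" key.
def Pre_find_incident (incidents : List (String × List (String × Int))) (criteria : List (String × Int)) (newest : Bool) : Prop :=
  ∀ p ∈ (PySem.Dict.ofList incidents).items,
    (((PySem.Dict.ofList criteria).items).all
      (fun kr => (PySem.Dict.ofList p.2).get? kr.1 == some kr.2)) = true →
    (PySem.Dict.ofList p.2).contains "timestamp" = true
instance (incidents : List (String × List (String × Int))) (criteria : List (String × Int)) (newest : Bool) : Decidable (Pre_find_incident incidents criteria newest) := by unfold Pre_find_incident; infer_instance

def pvWitness_find_incident : (List (String × List (String × Int))) × (List (String × Int)) × Bool :=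
  ([("i1", [("timestamp", 5)]), ("i2", [("timestamp", 3)])], [], false)

def Spec_find_incident (incidents : List (String × List (String × Int))) (criteria : List (String × Int)) (newest : Bool) (out : Option String) : Prop := out = find_incident_alt incidents criteria newest
instance (incidents : List (String × List (String × Int))) (criteria : List (String × Int)) (newest : Bool) (out : Option String) : Decidable (Spec_find_incident incidents criteria newest out) := by unfold Spec_find_incident; infer_instance

-- ===== CLAIM (what is proved, stated in full; the proofs are below) =====
def Claim_equal_find_incident : Prop := ∀ (incidents : List (String × List (String × Int))) (criteria : List (String × Int)) (newest : Bool), Dom_find_incident incidents criteria newest → Pre_find_incident incidents criteria newest → Spec_find_incident incidents criteria newest (find_incident incidents criteria newest)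

-- ===== LEMMAS AND PROOFS =====

-- the fold step of PySem.List.min?
def fiMinStep {α : Type} (k : α → Int) (acc : Option α) (x : α) : Option α :=
  match acc with
  | none => some x
  | some m => if k x < k m then some x else some m

theorem min?_eq_fold {α : Type} (l : List α) (k : α → Int) :
    PySem.List.min? l k = l.foldl (fiMinStep k) none := by
  simp only [PySem.List.min?]
  rfl

theorem max?_eq_fold (l : List Int) :
    PySem.List.max? l (fun t => t) = l.foldl (fun acc x => fiMinStep (fun t => -t) acc x) none := by
  simp only [PySem.List.max?]
  congr 1
  funext acc x
  cases acc with
  | none => rfl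
  | some m =>
    by_cases h : m < x
    · simp [fiMinStep, h, show -x < -m by omega]
    · simp [fiMinStep, h, show ¬(-x < -m) by omega]

-- the projected min fold: mapping k through the min? fold gives the id-key min fold on l.map k
theorem min?_map {α : Type} (l : List α) (k : α → Int) :
    (PySem.List.min? l k).map k = PySem.List.min? (l.map k) (fun t => t) := by
  rw [min?_eq_fold, min?_eq_fold, List.foldl_map]
  have : ∀ (acc : Option α),
      (l.foldl (fiMinStep k) acc).map k
        = l.foldl (fun a x => fiMinStep (fun t => t) a (k x)) (acc.map k) := by
    induction l with
    | nil => intro acc; rfl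
    | cons x t ih =>
      intro acc
      rw [List.foldl_cons, List.foldl_cons, ih]
      congr 1
      cases acc with
      | none => rfl
      | some m => simp only [fiMinStep]; by_cases h : k x < k m <;> simp [h]
  simpa using this none

-- mapping k through the min?-with-key-(-k) fold gives the id-key max fold on l.map k
theorem min?_neg_map {α : Type} (l : List α) (k : α → Int) :
    (PySem.List.min? l (fun x => -(k x))).map k = PySem.List.max? (l.map k) (fun t => t) := by
  rw [min?_eq_fold, max?_eq_fold, List.foldl_map]
  have : ∀ (acc : Option α),
      (l.foldl (fiMinStep (fun x => -(k x))) acc).map k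
        = l.foldl (fun a x => fiMinStep (fun t => -t) a (k x)) (acc.map k) := by
    induction l with
    | nil => intro acc; rfl
    | cons x t ih =>
      intro acc
      rw [List.foldl_cons, List.foldl_cons, ih]
      congr 1
      cases acc with
      | none => rfl
      | some m => simp only [fiMinStep]; by_cases h : -(k x) < -(k m) <;> simp [h]
  simpa using this none

-- the min? element is the FIRST element of l with its key value
theorem min?_first {α : Type} (l : List α) (k : α → Int) :
    ∀ (a : α), ∃ m, l.foldl (fiMinStep k) (some a) = some m ∧ k m ≤ k a ∧
      (∀ y ∈ l, k m ≤ k y) ∧ (a :: l).find? (fun y => k y == k m) = some m := by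
  induction l with
  | nil =>
    intro a
    exact ⟨a, rfl, le_refl _, by simp, by simp⟩
  | cons x t ih =>
    intro a
    by_cases h : k x < k a
    · obtain ⟨m, hf, hle, hall, hfind⟩ := ih x
      refine ⟨m, ?_, by omega, ?_, ?_⟩
      · rw [List.foldl_cons]; simpa [fiMinStep, h] using hf
      · intro y hy
        rcases List.mem_cons.mp hy with rfl | hy
        · exact hle
        · exact hall y hy
      · have hne : ¬((fun y => k y == k m) a = true) := by
          simp only [beq_iff_eq]
          omega
        rw [List.find?_cons_of_neg (p := fun y => k y == k m) hne, hfind]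
    · obtain ⟨m, hf, hle, hall, hfind⟩ := ih a
      have hax : k a ≤ k x := le_of_not_gt h
      refine ⟨m, ?_, hle, ?_, ?_⟩
      · rw [List.foldl_cons]; simpa [fiMinStep, h] using hf
      · intro y hy
        rcases List.mem_cons.mp hy with rfl | hy
        · omega
        · exact hall y hy
      · by_cases ha : k a = k m
        · rw [List.find?_cons_of_pos (by simp [ha])]
          rw [List.find?_cons_of_pos (by simp [ha])] at hfind
          exact hfind
        · have hxm : ¬((fun y => k y == k m) x = true) := by
            simp only [beq_iff_eq]
            omega
          have ham : ¬((fun y => k y == k m) a = true) := by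
            simp only [beq_iff_eq]
            exact ha
          rw [List.find?_cons_of_neg (p := fun y => k y == k m) ham,
            List.find?_cons_of_neg (p := fun y => k y == k m) hxm]
          rw [List.find?_cons_of_neg (p := fun y => k y == k m) ham] at hfind
          exact hfind

theorem min?_is_first {α : Type} (l : List α) (k : α → Int) (m : α)
    (h : PySem.List.min? l k = some m) :
    l.find? (fun y => k y == k m) = some m := by
  cases l with
  | nil => simp [PySem.List.min?] at h
  | cons x t =>
    rw [min?_eq_fold, List.foldl_cons] at h
    have hx : fiMinStep k none x = some x := rfl
    rw [hx] at h
    obtain ⟨m', hf, _, _, hfind⟩ := min?_first t k x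
    rw [hf] at h
    cases h
    exact hfind

-- splitting the conjunction predicate of find? through a filter
theorem find?_and_filter {α : Type} (l : List α) (p q : α → Bool) :
    l.find? (fun x => p x && q x) = (l.filter p).find? q := by
  induction l with
  | nil => rfl
  | cons x t ih =>
    by_cases hp : p x = true
    · by_cases hq : q x = true
      · rw [List.find?_cons_of_pos (by simp [hp, hq]), List.filter_cons_of_pos hp,
          List.find?_cons_of_pos hq]
      · rw [List.find?_cons_of_neg (by simp [hp, hq]), List.filter_cons_of_pos hp,
          List.find?_cons_of_neg (by simp [hq]), ih]
    · rw [List.find?_cons_of_neg (by simp [hp]), List.filter_cons_of_neg (by simp [hp]), ih]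

def fiTs (d : List (String × Int)) : Int := (PySem.Dict.ofList d).getD "timestamp" 0

theorem find_incident_eq_alt (incidents : List (String × List (String × Int))) (criteria : List (String × Int)) (newest : Bool) :
    find_incident incidents criteria newest = find_incident_alt incidents criteria newest := by
  unfold find_incident find_incident_alt
  set items := (PySem.Dict.ofList incidents).items with hitems
  set l := items.filter (fun p => fiMatches criteria p.2) with hl
  by_cases hc : l = []
  · have hfe : items.filter (fun p => fiMatches criteria p.2) = [] := by rw [← hl]; exact hc
    cases newest <;> simp [hc, hfe, PySem.List.min?, PySem.List.max?]
  · simp only [hc, if_false]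
    have hne : PySem.List.min? l (if newest = true
        then (fun x => -((PySem.Dict.ofList x.2).getD "timestamp" 0))
        else (fun x => (PySem.Dict.ofList x.2).getD "timestamp" 0)) ≠ none := by
      intro h
      exact hc ((PySem.List.min?_eq_none_iff _ _).mp h)
    obtain ⟨m, hm⟩ := Option.ne_none_iff_exists'.mp hne
    have htarget : (if newest = true
        then PySem.List.max? (l.map (fun p => (PySem.Dict.ofList p.2).getD "timestamp" 0)) (fun t => t)
        else PySem.List.min? (l.map (fun p => (PySem.Dict.ofList p.2).getD "timestamp" 0)) (fun t => t))
        = some (fiTs m.2) := by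
      cases newest with
      | false =>
        simp only [Bool.false_eq_true, if_false] at hm ⊢
        rw [← min?_map l (fun p => (PySem.Dict.ofList p.2).getD "timestamp" 0), hm]
        rfl
      | true =>
        simp only [if_true] at hm ⊢
        rw [← min?_neg_map l (fun p => (PySem.Dict.ofList p.2).getD "timestamp" 0), hm]
        rfl
    have hfind : items.find? (fun p => fiMatches criteria p.2 &&
        ((PySem.Dict.ofList p.2).getD "timestamp" 0 == fiTs m.2)) = some m := by
      rw [find?_and_filter, ← hl]
      cases newest with
      | false =>
        simp only [Bool.false_eq_true, if_false] at hm
        exact min?_is_first l (fun p => (PySem.Dict.ofList p.2).getD "timestamp" 0) m hm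
      | true =>
        simp only [if_true] at hm
        have h1 := min?_is_first l (fun x => -((PySem.Dict.ofList x.2).getD "timestamp" 0)) m hm
        have hpe : (fun (y : String × List (String × Int)) =>
              ((PySem.Dict.ofList y.2).getD "timestamp" 0 == fiTs m.2))
            = (fun y => (-((PySem.Dict.ofList y.2).getD "timestamp" 0) ==
                -((PySem.Dict.ofList m.2).getD "timestamp" 0))) := by
          funext y
          by_cases h : (PySem.Dict.ofList y.2).getD "timestamp" 0 = (PySem.Dict.ofList m.2).getD "timestamp" 0
          · simp [fiTs, h]
          · have h2 : ¬(-(PySem.Dict.ofList y.2).getD "timestamp" 0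
                = -(PySem.Dict.ofList m.2).getD "timestamp" 0) := by omega
            simp [fiTs, h, h2]
        rw [hpe]
        exact h1
    rw [hm, htarget]
    simp [hfind]

-- ===== VERDICT (by name: the statement is the Claim_ definition above) =====
theorem find_incident_spec : Claim_equal_find_incident := by
  intro incidents criteria newest _ _
  unfold Spec_find_incident
  exact find_incident_eq_alt incidents criteria newest
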